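-- pv_equiv track=rewrite | github.com/daniel91953574/repository_pub | conversão numérica.py | decimal_to_base30
-- ===== SOURCE A (Python) =====
-- def decimal_to_base30(decimal_number):
--     base30_digits = "0123456789ABCDEFGHIJKLMNOPQRSTUVWXYZ"
--     if decimal_number < 0:
--         return '-' + decimal_to_base30(-decimal_number)
--
--     decimal_number = int(decimal_number)
--     result = []
--     if decimal_number == 0:
--         return '0'
--
--     while decimal_number > 0:
--         remainder = decimal_number % 30
--         result.append(base30_digits[remainder])
--         decimal_number //= 30
--
--     return ''.join(reversed(result))
-- ===== SOURCE B (Python) =====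
-- def decimal_to_base30(decimal_number):
--     base30_digits = "0123456789ABCDEFGHIJKLMNOPQRSTUVWXYZ"
--     if decimal_number < 0:
--         return '-' + decimal_to_base30(-decimal_number)
--     n = int(decimal_number)
--     p = 1
--     while p * 30 <= n:
--         p *= 30
--     out = ''
--     while p > 0:
--         out += base30_digits[n // p]
--         n %= p
--         p //= 30
--     return out
-- ===== Notes on version B (the rewrite author's own statement) =====
-- stated objective: alternative
-- what changed: B extracts digits most-significant-first by first finding the largest power of 30 not exceeding n and then repeatedly dividing by descending powers, instead of A's LSB-first while-loop that appends to a list and reverses it; B also needs no explicit zero case.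
import Mathlib
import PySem

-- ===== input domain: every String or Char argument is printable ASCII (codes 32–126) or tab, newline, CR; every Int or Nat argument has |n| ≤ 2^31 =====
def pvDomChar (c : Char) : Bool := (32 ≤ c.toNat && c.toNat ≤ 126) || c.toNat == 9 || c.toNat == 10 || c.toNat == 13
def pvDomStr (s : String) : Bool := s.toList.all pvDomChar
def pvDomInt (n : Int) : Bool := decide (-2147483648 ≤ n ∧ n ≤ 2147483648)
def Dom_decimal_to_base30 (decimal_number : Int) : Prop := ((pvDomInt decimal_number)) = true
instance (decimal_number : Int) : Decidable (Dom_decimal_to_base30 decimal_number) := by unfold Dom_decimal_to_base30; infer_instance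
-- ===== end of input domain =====

-- B extracts digits most-significant-first via descending powers of 30 (no list, no
-- reverse, no explicit zero case), replacing A's LSB-first append-then-reverse loop;
-- objective: alternative decomposition (same cost).
-- Strings are modelled as their List Char contents (String.ofList at the boundary).

-- ===== PORT A =====
def pvDigits : List Char := "0123456789ABCDEFGHIJKLMNOPQRSTUVWXYZ".toList

-- base30_digits[i] (valid index on every admitted input)
def pvDigit (i : Int) : Char := (PySem.List.pyGet? pvDigits i).getD '0'

-- measure fact used for termination of the division loops
theorem pvFloordiv30_toNat_lt (n : Int) (h : 0 < n) :
    (PySem.Int.floordiv n 30).toNat < n.toNat := by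
  rw [PySem.Int.floordiv_eq_ediv_of_pos (by omega)]
  omega

-- A's while-loop: result.append(base30_digits[n % 30]); n //= 30
def pvLoopA (n : Int) (result : List Char) : List Char :=
  if h : n > 0 then
    pvLoopA (PySem.Int.floordiv n 30) (result ++ [pvDigit (PySem.Int.mod n 30)])
  else result
termination_by n.toNat
decreasing_by exact pvFloordiv30_toNat_lt n h

def pvCoreA (decimal_number : Int) : List Char :=
  if h : decimal_number < 0 then '-' :: pvCoreA (-decimal_number)
  else if decimal_number = 0 then ['0']
  else (pvLoopA decimal_number []).reverse
termination_by (if decimal_number < 0 then 1 else 0)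
decreasing_by simp [h]; omega

def decimal_to_base30 (decimal_number : Int) : String :=
  String.ofList (pvCoreA decimal_number)

-- ===== PORT B =====
-- first loop of B: while p * 30 <= n: p *= 30   (0 < p is a totality guard; p starts at 1)
def pvPowB (p n : Int) : Int :=
  if h : 0 < p ∧ p * 30 ≤ n then pvPowB (p * 30) n else p
termination_by (n - p).toNat
decreasing_by omega

-- second loop of B: while p > 0: out += digits[n // p]; n %= p; p //= 30
def pvEmitB (n p : Int) (out : List Char) : List Char :=
  if h : p > 0 then
    pvEmitB (PySem.Int.mod n p) (PySem.Int.floordiv p 30)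
      (out ++ [pvDigit (PySem.Int.floordiv n p)])
  else out
termination_by p.toNat
decreasing_by exact pvFloordiv30_toNat_lt p h

def pvCoreB (decimal_number : Int) : List Char :=
  if h : decimal_number < 0 then '-' :: pvCoreB (-decimal_number)
  else pvEmitB decimal_number (pvPowB 1 decimal_number) []
termination_by (if decimal_number < 0 then 1 else 0)
decreasing_by simp [h]; omega

def decimal_to_base30_alt (decimal_number : Int) : String :=
  String.ofList (pvCoreB decimal_number)

-- ===== PRECONDITION & SPEC =====
def Spec_decimal_to_base30 (decimal_number : Int) (out : String) : Prop := out = decimal_to_base30_alt decimal_number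
instance (decimal_number : Int) (out : String) : Decidable (Spec_decimal_to_base30 decimal_number out) := by unfold Spec_decimal_to_base30; infer_instance

-- ===== CLAIM (what is proved, stated in full; the proofs are below) =====
def Claim_equal_decimal_to_base30 : Prop := ∀ (decimal_number : Int), Dom_decimal_to_base30 decimal_number → Spec_decimal_to_base30 decimal_number (decimal_to_base30 decimal_number)

-- ===== LEMMAS AND PROOFS =====

-- MSB-first digit string of n without leading zeros (= A's loop, reversed)
def pvGoA (n : Int) : List Char :=
  if h : 0 < n then pvGoA (n / 30) ++ [pvDigit (n % 30)] else []
termination_by n.toNat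
decreasing_by omega

theorem pvGoA_pos (n : Int) (h : 0 < n) :
    pvGoA n = pvGoA (n / 30) ++ [pvDigit (n % 30)] := by
  rw [pvGoA, dif_pos h]

theorem pvLoopA_reverse (n : Int) (acc : List Char) :
    (pvLoopA n acc).reverse = pvGoA n ++ acc.reverse := by
  by_cases h : n > 0
  · rw [pvLoopA, dif_pos h, pvLoopA_reverse (PySem.Int.floordiv n 30), pvGoA_pos n h,
      PySem.Int.floordiv_eq_ediv_of_pos (by omega : (0:Int) < 30),
      PySem.Int.mod_eq_emod_of_pos (by omega : (0:Int) < 30)]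
    simp
  · rw [pvLoopA, dif_neg h, pvGoA, dif_neg (by omega)]
    simp
termination_by n.toNat
decreasing_by exact pvFloordiv30_toNat_lt n h

-- the k+1 base-30 digits of n, MSB first (with leading zeros)
def pvBee : Nat → Int → List Char
  | 0, n => [pvDigit n]
  | k+1, n => pvDigit (n / 30^(k+1)) :: pvBee k (n % 30^(k+1))

theorem pv_mod_pow_div (n : Int) (hn : 0 ≤ n) (k : Nat) :
    (n % 30^(k+1)) / 30 = (n / 30) % 30^k := by
  obtain ⟨a, rfl⟩ := Int.eq_ofNat_of_zero_le hn
  have h := Nat.mod_mul_right_div_self a 30 (30^k)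
  rw [← pow_succ'] at h
  exact_mod_cast h

theorem pvBee_step (k : Nat) (n : Int) (hn : 0 ≤ n) :
    pvBee (k+1) n = pvBee k (n / 30) ++ [pvDigit (n % 30)] := by
  induction k generalizing n with
  | zero => simp [pvBee]
  | succ k ih =>
    have hm : 0 ≤ n % 30^(k+1+1) := Int.emod_nonneg n (by positivity)
    rw [pvBee, ih (n % 30^(k+1+1)) hm, pvBee]
    have hd : n / 30^(k+1+1) = (n / 30) / 30^(k+1) := by
      rw [Int.ediv_ediv_of_nonneg (by norm_num : (0:Int) ≤ 30), ← pow_succ']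
    have hdm : (n % 30^(k+1+1)) / 30 = (n / 30) % 30^(k+1) := pv_mod_pow_div n hn (k+1)
    have hmm : (n % 30^(k+1+1)) % 30 = n % 30 :=
      Int.emod_emod_of_dvd n ⟨30^(k+1), by ring⟩
    rw [hd, hdm, hmm]
    simp

theorem pvBee_eq_goA (k : Nat) (n : Int) (h1 : 30^k ≤ n) (h2 : n < 30^(k+1)) :
    pvBee k n = pvGoA n := by
  induction k generalizing n with
  | zero =>
    have hn : 0 < n := by simpa using lt_of_lt_of_le one_pos h1
    rw [pvBee, pvGoA_pos n hn, pvGoA, dif_neg]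
    · have hd : n / 30 = 0 := Int.ediv_eq_zero_of_lt (by omega) (by simpa using h2)
      have hm : n % 30 = n := Int.emod_eq_of_lt (by omega) (by simpa using h2)
      simp [hm]
    · have : n / 30 = 0 := Int.ediv_eq_zero_of_lt (by omega) (by simpa using h2)
      omega
  | succ k ih =>
    have hn : 0 < n := lt_of_lt_of_le (by positivity) h1
    have hlow : (30:Int)^k ≤ n / 30 := by
      rw [Int.le_ediv_iff_mul_le (by omega)]
      calc (30:Int)^k * 30 = 30^(k+1) := by ring
        _ ≤ n := h1
    have hhigh : n / 30 < 30^(k+1) := by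
      rw [Int.ediv_lt_iff_lt_mul (by omega)]
      calc n < 30^(k+1+1) := h2
        _ = 30^(k+1) * 30 := by ring
    rw [pvBee_step k n (by omega), ih (n / 30) hlow hhigh, ← pvGoA_pos n hn]

theorem pvEmitB_eq (k : Nat) (n : Int) (out : List Char) (hn : 0 ≤ n)
    (h2 : n < 30^(k+1)) : pvEmitB n (30^k) out = out ++ pvBee k n := by
  induction k generalizing n out with
  | zero =>
    rw [pvEmitB, dif_pos (by norm_num : (30:Int)^0 > 0)]
    have e1 : PySem.Int.mod n (30^0) = 0 := by
      rw [pow_zero, PySem.Int.mod_eq_emod_of_pos (by omega)]; simp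
    have e2 : PySem.Int.floordiv (30^0 : Int) 30 = 0 := by decide
    have e3 : PySem.Int.floordiv n (30^0) = n := by
      rw [pow_zero, PySem.Int.floordiv_eq_ediv_of_pos (by omega)]; simp
    rw [e1, e2, e3, pvEmitB, dif_neg (by omega)]
    simp [pvBee]
  | succ k ih =>
    have hp : (0:Int) < 30^(k+1) := by positivity
    rw [pvEmitB, dif_pos hp]
    have e1 : PySem.Int.mod n (30^(k+1)) = n % 30^(k+1) :=
      PySem.Int.mod_eq_emod_of_pos hp
    have e2 : PySem.Int.floordiv ((30:Int)^(k+1)) 30 = 30^k := by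
      rw [PySem.Int.floordiv_eq_ediv_of_pos (by omega),
        show ((30:Int)^(k+1)) = 30^k * 30 by ring, Int.mul_ediv_cancel _ (by omega)]
    have e3 : PySem.Int.floordiv n ((30:Int)^(k+1)) = n / 30^(k+1) :=
      PySem.Int.floordiv_eq_ediv_of_pos hp
    rw [e1, e2, e3, ih (n % 30^(k+1)) _ (Int.emod_nonneg n (by omega))
      (Int.emod_lt_of_pos n hp), pvBee]
    simp

theorem pvPowB_spec (n p : Int) (hp : 0 < p) (hpn : p ≤ n) :
    ∃ k : Nat, pvPowB p n = p * 30^k ∧ p * 30^k ≤ n ∧ n < p * 30^(k+1) := by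
  by_cases h : p * 30 ≤ n
  · obtain ⟨k, hk1, hk2, hk3⟩ := pvPowB_spec n (p * 30) (by omega) h
    refine ⟨k+1, ?_, ?_, ?_⟩
    · rw [pvPowB, dif_pos ⟨hp, h⟩, hk1]; ring
    · calc p * 30^(k+1) = p * 30 * 30^k := by ring
        _ ≤ n := hk2
    · calc n < p * 30 * 30^(k+1) := hk3
        _ = p * 30^(k+1+1) := by ring
  · exact ⟨0, by rw [pvPowB, dif_neg (by tauto)]; ring_nf, by simpa using hpn,
      by rw [pow_one]; omega⟩
termination_by (n - p).toNat
decreasing_by omega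

theorem pvCore_eq (d : Int) : pvCoreA d = pvCoreB d := by
  by_cases h : d < 0
  · rw [pvCoreA, dif_pos h, pvCoreB, dif_pos h]
    have := pvCore_eq (-d)
    rw [this]
  · rw [pvCoreA, dif_neg h, pvCoreB, dif_neg h]
    by_cases h0 : d = 0
    · subst h0
      have e0 : pvPowB 1 0 = 1 := by rw [pvPowB]; norm_num
      have e1 : PySem.Int.mod 0 1 = 0 := by decide
      have e2 : PySem.Int.floordiv 1 30 = 0 := by decide
      have e3 : PySem.Int.floordiv 0 1 = 0 := by decide
      rw [if_pos rfl, e0, pvEmitB, dif_pos (by norm_num : (1:Int) > 0), e1, e2, e3,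
        pvEmitB, dif_neg (by norm_num)]
      decide
    · have hd : 0 < d := by omega
      obtain ⟨k, hk1, hk2, hk3⟩ := pvPowB_spec d 1 one_pos (by omega)
      rw [if_neg h0, hk1, one_mul,
        pvEmitB_eq k d [] (by omega) (by simpa using hk3),
        pvBee_eq_goA k d (by simpa using hk2) (by simpa using hk3)]
      simpa using pvLoopA_reverse d []
termination_by (if d < 0 then 1 else 0)
decreasing_by simp [h]; omega

-- ===== VERDICT (by name: the statement is the Claim_ definition above) =====
theorem decimal_to_base30_spec : Claim_equal_decimal_to_base30 := by
  intro d _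
  unfold Spec_decimal_to_base30 decimal_to_base30 decimal_to_base30_alt
  rw [pvCore_eq]
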